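-- pv_equiv track=rewrite | github.com/rvhonorato/prot-dna-martini-implementation | scripts/capri-eval.py | retrieve_izone
-- ===== SOURCE A (Python) =====
-- from itertools import groupby
-- from operator import itemgetter
--
-- def get_range(data):
--     ranges = []
--     for k, g in groupby(enumerate(data), lambda x: x[0] - x[1]):
--         group = (map(itemgetter(1), g))
--         group = list(map(int, group))
--         ranges.append((group[0], group[-1]))
--     return ranges
--
-- def retrieve_izone(c_dic, numbering_dic):
--     # based on the reference interface, create izone
--     izone_l = []
--     for chain in c_dic:
--         ref_dic = {}
--         for bound_res in list(c_dic[chain].items())[0][1]: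
--             try:
--                 ub = numbering_dic[chain][bound_res]
--                 ref_dic[bound_res] = ub
--             except KeyError:
--                 pass
--
--         for bound_range in get_range(ref_dic.keys()):
--             unbound_res_l = []
--             for bound_res in range(bound_range[0], bound_range[1] + 1):
--                 unbound_res_l.append(ref_dic[bound_res])
--
--             for unbound_range in get_range(unbound_res_l):
--                 bound_res_l = []
--                 for unbound_res in range(unbound_range[0], unbound_range[1] + 1):
--                     bound_res_l.append(list(ref_dic.keys())[list(ref_dic.values()).index(unbound_res)])
--
--                 range_a = get_range(bound_res_l)[0]  # bound
--                 range_b = unbound_range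
--
--                 izone_str = 'ZONE %s%i-%s%i:%s%i-%s%i' % (
--                     chain, range_a[0], chain, range_a[1], chain, range_b[0], chain, range_b[1])
--                 izone_l.append(izone_str)
--
--     return izone_l
-- ===== SOURCE B (Python) =====
-- def retrieve_izone(c_dic, numbering_dic):
--     # One pass per chain: pair each interface residue with its unbound number, cut a
--     # zone whenever either coordinate stops stepping by +1, and resolve the bound
--     # side through a first-occurrence dictionary (A's list(values).index semantics)
--     # instead of rescanning the whole dict per residue.
--     izone_l = []
--     for chain, cmap in c_dic.items():
--         residues = next(iter(cmap.values()))
--         nmap = numbering_dic.get(chain, {})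
--         pairs = []
--         seen = set()
--         for b in residues:
--             if b in nmap and b not in seen:
--                 seen.add(b)
--                 pairs.append((b, nmap[b]))
--         first_key = {}
--         for b, u in pairs:
--             if u not in first_key:
--                 first_key[u] = b
--         for seg in _segments(pairs):
--             u0, u1 = seg[0][1], seg[-1][1]
--             firsts = [first_key[u] for u in range(u0, u1 + 1)]
--             a1 = firsts[0]
--             k = 1
--             while k < len(firsts) and firsts[k] == firsts[k - 1] + 1:
--                 a1 = firsts[k]
--                 k += 1
--             izone_l.append('ZONE %s%i-%s%i:%s%i-%s%i' % (
--                 chain, firsts[0], chain, a1, chain, u0, chain, u1))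
--     return izone_l
--
--
-- def _segments(pairs):
--     segs = []
--     cur = []
--     for (b, u) in pairs:
--         if cur and b == cur[-1][0] + 1 and u == cur[-1][1] + 1:
--             cur.append((b, u))
--         else:
--             if cur:
--                 segs.append(cur)
--             cur = [(b, u)]
--     if cur:
--         segs.append(cur)
--     return segs
-- ===== Notes on version B (the rewrite author's own statement) =====
-- stated objective: faster
-- what changed: A re-ranges with nested get_range passes and a full list(values).index scan per residue; B builds the (bound, unbound) pair list and a first-occurrence dictionary once per chain, then makes a single left-to-right pass that closes a zone whenever either coordinate stops stepping by +1.
import Mathlib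
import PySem

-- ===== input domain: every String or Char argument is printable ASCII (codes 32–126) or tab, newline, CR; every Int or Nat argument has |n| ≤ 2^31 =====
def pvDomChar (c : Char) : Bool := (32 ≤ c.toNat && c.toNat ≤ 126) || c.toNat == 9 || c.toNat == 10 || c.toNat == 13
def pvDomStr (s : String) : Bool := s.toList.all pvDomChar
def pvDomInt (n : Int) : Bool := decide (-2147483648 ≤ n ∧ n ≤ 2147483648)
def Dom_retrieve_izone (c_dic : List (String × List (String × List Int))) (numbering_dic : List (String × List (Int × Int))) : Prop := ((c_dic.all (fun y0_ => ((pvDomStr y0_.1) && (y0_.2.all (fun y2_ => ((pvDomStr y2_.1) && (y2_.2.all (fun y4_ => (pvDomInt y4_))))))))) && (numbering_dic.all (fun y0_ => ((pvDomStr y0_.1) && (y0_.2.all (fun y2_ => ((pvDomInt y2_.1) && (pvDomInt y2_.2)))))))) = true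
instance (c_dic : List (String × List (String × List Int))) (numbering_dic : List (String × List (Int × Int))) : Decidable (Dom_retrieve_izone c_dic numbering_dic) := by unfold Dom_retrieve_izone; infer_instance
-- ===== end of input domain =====

-- B replaces A's nested re-ranging (get_range over keys, then over values, with a full
-- list(values).index scan per residue) by one left-to-right pass that cuts a zone whenever
-- either coordinate stops stepping by +1, resolving the bound side through a first-occurrence
-- dictionary built once per chain; objective: faster (no inner rescans of the whole dict).

-- ===== PORT A =====

-- dict[k] on the association-list encoding: first match (exact Python dict lookup)
def pyLookup {κ β : Type} [BEq κ] (d : List (κ × β)) (k : κ) : Option β :=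
  (d.find? (fun p => p.1 == k)).map (fun p => p.2)

-- itertools.groupby(enumerate(data), lambda x: x[0]-x[1]) groups maximal runs where the
-- value steps by +1 as the index steps by 1 (equal key i-v on consecutive entries).
def groupRuns : List Int → List (List Int)
  | [] => []
  | [x] => [[x]]
  | x :: y :: xs =>
    match groupRuns (y :: xs) with
    | [] => [[x]]
    | g :: gs => if y == x + 1 then (x :: g) :: gs else [x] :: g :: gs

-- get_range: (group[0], group[-1]) of each run (groups are never empty)
def get_range (data : List Int) : List (Int × Int) :=
  (groupRuns data).map (fun g => (g.headD 0, g.getLastD 0))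

-- 'ZONE %s%i-%s%i:%s%i-%s%i' % (chain, a0, chain, a1, chain, b0, chain, b1) (both sources share this format string)
def mkZone (chain : String) (a0 a1 b0 b1 : Int) : String :=
  "ZONE " ++ chain ++ PySem.Int.toStr a0 ++ "-" ++ chain ++ PySem.Int.toStr a1 ++ ":" ++
    chain ++ PySem.Int.toStr b0 ++ "-" ++ chain ++ PySem.Int.toStr b1

def retrieve_izone (c_dic : List (String × List (String × List Int))) (numbering_dic : List (String × List (Int × Int))) : List String :=
  -- for chain in c_dic: iterates the keys
  (c_dic.map (fun p => p.1)).foldl (fun izone_l chain =>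
    let cmap := (pyLookup c_dic chain).getD []
    -- list(c_dic[chain].items())[0][1]; the [0] exists under Pre_ (cmap ≠ [])
    let bound_list := (cmap.headD ("", [])).2
    -- numbering_dic[chain]: a KeyError on the chain is caught by A's try/except, i.e. no residue matches
    let nmap := (pyLookup numbering_dic chain).getD []
    let ref := bound_list.foldl (fun (ref : PySem.Dict Int Int) bound_res =>
        match pyLookup nmap bound_res with
        | some ub => ref.insert bound_res ub
        | none => ref) (PySem.Dict.mk [])
    (get_range ref.keys).foldl (fun izone_l bound_range =>
      -- ref_dic[bound_res] never raises here: every point of a run is a key (default never used)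
      let unbound_res_l := (PySem.List.pyRange bound_range.1 (bound_range.2 + 1) 1).foldl
          (fun acc bound_res => acc ++ [(ref.get? bound_res).getD 0]) []
      (get_range unbound_res_l).foldl (fun izone_l unbound_range =>
        -- list(ref_dic.keys())[list(ref_dic.values()).index(unbound_res)]; .index never raises here
        let bound_res_l := (PySem.List.pyRange unbound_range.1 (unbound_range.2 + 1) 1).foldl
            (fun acc unbound_res =>
              acc ++ [ref.keys.getD ((PySem.List.index? ref.values unbound_res).getD 0) 0]) []
        let range_a := (get_range bound_res_l).headD (0, 0)
        izone_l ++ [mkZone chain range_a.1 range_a.2 unbound_range.1 unbound_range.2]) izone_l)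
      izone_l) []

-- ===== PORT B =====

-- _segments: one pass, cut whenever either coordinate does not step by +1
def segGo (segs : List (List (Int × Int))) (cur : List (Int × Int)) : List (Int × Int) → List (List (Int × Int))
  | [] => if cur.isEmpty then segs else segs ++ [cur]
  | p :: rest =>
    if !cur.isEmpty && p.1 == (cur.getLastD (0, 0)).1 + 1 && p.2 == (cur.getLastD (0, 0)).2 + 1 then
      segGo segs (cur ++ [p]) rest
    else
      segGo (if cur.isEmpty then segs else segs ++ [cur]) [p] rest

def segments (pairs : List (Int × Int)) : List (List (Int × Int)) := segGo [] [] pairs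

-- the 'while' loop extending a1 while firsts keeps stepping by +1
def firstRunEnd (prev : Int) : List Int → Int
  | [] => prev
  | x :: xs => if x == prev + 1 then firstRunEnd x xs else prev

def retrieve_izone_alt (c_dic : List (String × List (String × List Int))) (numbering_dic : List (String × List (Int × Int))) : List String :=
  c_dic.foldl (fun izone_l pr =>
    let chain := pr.1
    -- next(iter(cmap.values())); exists under Pre_
    let residues := (pr.2.headD ("", [])).2
    let nmap := (pyLookup numbering_dic chain).getD []
    let pairs := (residues.foldl (fun (st : PySem.Set Int × List (Int × Int)) b =>
        match pyLookup nmap b with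
        | some u => if PySem.Set.contains st.1 b then st else (PySem.Set.add st.1 b, st.2 ++ [(b, u)])
        | none => st) (PySem.Set.empty, [])).2
    let first_key := pairs.foldl (fun (d : PySem.Dict Int Int) p =>
        if d.contains p.2 then d else d.insert p.2 p.1) (PySem.Dict.mk [])
    (segments pairs).foldl (fun out seg =>
      let u0 := (seg.headD (0, 0)).2
      let u1 := (seg.getLastD (0, 0)).2
      -- firsts = [first_key[u] for u in range(u0, u1+1)]; never empty, every u present
      let firsts := (PySem.List.pyRange u0 (u1 + 1) 1).map (fun u => (first_key.get? u).getD 0)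
      out ++ [mkZone chain (firsts.headD 0) (firstRunEnd (firsts.headD 0) firsts.tail) u0 u1]) izone_l) []

-- ===== PRECONDITION & SPEC =====

-- Pre_ excludes: (a) chains whose interface dict is empty, on which A raises IndexError (and B
-- StopIteration); (b) association lists with duplicate keys at some dict level, which encode no
-- Python dict (a Python dict always has distinct keys).
def Pre_retrieve_izone (c_dic : List (String × List (String × List Int))) (numbering_dic : List (String × List (Int × Int))) : Prop :=
  (c_dic.map Prod.fst).Nodup ∧ (numbering_dic.map Prod.fst).Nodup ∧
  (∀ p ∈ c_dic, p.2 ≠ [] ∧ (p.2.map Prod.fst).Nodup) ∧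
  (∀ p ∈ numbering_dic, (p.2.map Prod.fst).Nodup)
instance (c_dic : List (String × List (String × List Int))) (numbering_dic : List (String × List (Int × Int))) : Decidable (Pre_retrieve_izone c_dic numbering_dic) := by unfold Pre_retrieve_izone; infer_instance

def pvWitness_retrieve_izone : (List (String × List (String × List Int))) × (List (String × List (Int × Int))) :=
  ([("A", [("x", [1, 2, 5])]), ("B", [("y", [7])])], [("A", [(1, 10), (2, 11), (5, 12)])])

def Spec_retrieve_izone (c_dic : List (String × List (String × List Int))) (numbering_dic : List (String × List (Int × Int))) (out : List String) : Prop := out = retrieve_izone_alt c_dic numbering_dic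
instance (c_dic : List (String × List (String × List Int))) (numbering_dic : List (String × List (Int × Int))) (out : List String) : Decidable (Spec_retrieve_izone c_dic numbering_dic out) := by unfold Spec_retrieve_izone; infer_instance

-- ===== CLAIM (what is proved, stated in full; the proofs are below) =====
def Claim_equal_retrieve_izone : Prop := ∀ (c_dic : List (String × List (String × List Int))) (numbering_dic : List (String × List (Int × Int))), Dom_retrieve_izone c_dic numbering_dic → Pre_retrieve_izone c_dic numbering_dic → Spec_retrieve_izone c_dic numbering_dic (retrieve_izone c_dic numbering_dic)

-- ===== LEMMAS AND PROOFS =====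

def splitAdj {α : Type} (r : α → α → Bool) : List α → List (List α)
  | [] => []
  | [x] => [[x]]
  | x :: y :: xs =>
    match splitAdj r (y :: xs) with
    | [] => [[x]]
    | g :: gs => if r x y then (x :: g) :: gs else [x] :: g :: gs

theorem splitAdj_shape {α : Type} (r : α → α → Bool) (x : α) (xs : List α) :
    ∃ g gs, splitAdj r (x :: xs) = (x :: g) :: gs := by
  induction xs generalizing x with
  | nil => exact ⟨[], [], rfl⟩
  | cons y ys ih =>
    obtain ⟨g, gs, h⟩ := ih y
    by_cases hr : r x y
    · exact ⟨y :: g, gs, by simp [splitAdj, h, hr]⟩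
    · exact ⟨[], (y :: g) :: gs, by simp [splitAdj, h, hr]⟩

theorem splitAdj_flatten {α : Type} (r : α → α → Bool) : (l : List α) → (splitAdj r l).flatten = l
  | [] => by simp [splitAdj]
  | [x] => by simp [splitAdj]
  | x :: y :: xs => by
    have IH := splitAdj_flatten r (y :: xs)
    obtain ⟨g, gs, h⟩ := splitAdj_shape r y xs
    rw [h] at IH
    by_cases hr : r x y <;> simp [splitAdj, h, hr] <;> simpa using IH

theorem isChain_of_mem_splitAdj {α : Type} (r : α → α → Bool) : (l : List α) → ∀ h ∈ splitAdj r l,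
    h ≠ [] ∧ List.IsChain (fun a b => r a b = true) h
  | [], h, hm => by simp [splitAdj] at hm
  | [x], h, hm => by simp [splitAdj] at hm; simp [hm]
  | x :: y :: xs, h, hm => by
    obtain ⟨g, gs, hs⟩ := splitAdj_shape r y xs
    have IH := fun h hm => isChain_of_mem_splitAdj r (y :: xs) h hm
    rw [hs] at IH
    by_cases hr : r x y <;> simp [splitAdj, hs, hr] at hm
    · rcases hm with hm | hm
      · subst hm
        have := (IH (y :: g) (by simp)).2
        exact ⟨by simp, List.isChain_cons_cons.mpr ⟨hr, this⟩⟩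
      · exact IH h (by simp [hm])
    · rcases hm with hm | hm | hm
      · simp [hm]
      · exact IH h (by simp [hm])
      · exact IH h (by simp [hm])

theorem splitAdj_map {α β : Type} (r : β → β → Bool) (f : α → β) : (l : List α) →
    splitAdj r (l.map f) = (splitAdj (fun a b => r (f a) (f b)) l).map (List.map f)
  | [] => by simp [splitAdj]
  | [x] => by simp [splitAdj]
  | x :: y :: xs => by
    have IH := splitAdj_map r f (y :: xs)
    obtain ⟨g, gs, hs⟩ := splitAdj_shape (fun a b => r (f a) (f b)) y xs
    rw [hs] at IH
    by_cases hr : r (f x) (f y) <;>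
      simp only [List.map_cons] at IH ⊢ <;>
      simp [splitAdj, hs, hr, IH]

theorem splitAdj_nested {α : Type} (r s : α → α → Bool) : (l : List α) →
    (splitAdj r l).flatMap (splitAdj s) = splitAdj (fun a b => r a b && s a b) l
  | [] => by simp [splitAdj]
  | [x] => by simp [splitAdj]
  | x :: y :: xs => by
    have IH := splitAdj_nested r s (y :: xs)
    obtain ⟨g, gs, hs⟩ := splitAdj_shape r y xs
    obtain ⟨gt, gts, hts⟩ := splitAdj_shape (fun a b => r a b && s a b) y xs
    by_cases hr : r x y
    · have hL : splitAdj r (x :: y :: xs) = (x :: y :: g) :: gs := by simp [splitAdj, hs, hr]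
      obtain ⟨h1, hs1, hss⟩ := splitAdj_shape s y g
      have IH' : (y :: h1) :: (hs1 ++ gs.flatMap (splitAdj s)) = (y :: gt) :: gts := by
        rw [hts] at IH; rw [hs] at IH; simpa [hss] using IH
      injection IH' with h_eq t_eq
      injection h_eq with _ h_eq'
      by_cases hsxy : s x y
      · have hR : splitAdj (fun a b => r a b && s a b) (x :: y :: xs) = (x :: y :: gt) :: gts := by
          simp [splitAdj, hts, hr, hsxy]
        have hfirst : splitAdj s (x :: y :: g) = (x :: y :: h1) :: hs1 := by
          simp [splitAdj, hss, hsxy]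
        rw [hL, hR]
        simp only [List.flatMap_cons, hfirst]
        simp [h_eq', t_eq]
      · have hR : splitAdj (fun a b => r a b && s a b) (x :: y :: xs) = [x] :: (y :: gt) :: gts := by
          simp [splitAdj, hts, hr, hsxy]
        have hfirst : splitAdj s (x :: y :: g) = [x] :: (y :: h1) :: hs1 := by
          simp [splitAdj, hss, hsxy]
        rw [hL, hR]
        simp only [List.flatMap_cons, hfirst]
        simp [h_eq', t_eq]
    · have hL : splitAdj r (x :: y :: xs) = [x] :: (y :: g) :: gs := by simp [splitAdj, hs, hr]
      have hR : splitAdj (fun a b => r a b && s a b) (x :: y :: xs) = [x] :: (y :: gt) :: gts := by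
        simp [splitAdj, hts, hr]
      rw [hL, hR]
      rw [hts] at IH; rw [hs] at IH
      simp only [List.flatMap_cons] at IH
      simp [splitAdj, IH]

theorem groupRuns_eq_splitAdj : (l : List Int) → groupRuns l = splitAdj (fun a b => b == a + 1) l
  | [] => rfl
  | [x] => rfl
  | x :: y :: xs => by
    have IH := groupRuns_eq_splitAdj (y :: xs)
    obtain ⟨g, gs, h⟩ := splitAdj_shape (fun a b : Int => b == a + 1) y xs
    rw [h] at IH
    simp only [groupRuns, splitAdj, IH, h]

-- the pair-adjacency relation of B's single pass
def pAdjF : (Int × Int) → (Int × Int) → Bool := fun a b => b.1 == a.1 + 1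
def pAdjS : (Int × Int) → (Int × Int) → Bool := fun a b => b.2 == a.2 + 1
def pAdj : (Int × Int) → (Int × Int) → Bool := fun a b => pAdjF a b && pAdjS a b

theorem segGo_eq : (rest : List (Int × Int)) → ∀ (x : Int × Int) (cur : List (Int × Int)) (segs : List (List (Int × Int))),
    segGo segs (cur ++ [x]) rest =
      segs ++ ((cur ++ (splitAdj pAdj (x :: rest)).headD []) :: (splitAdj pAdj (x :: rest)).tail)
  | [], x, cur, segs => by simp [segGo, splitAdj]
  | y :: rest', x, cur, segs => by
    obtain ⟨g, gs, hs⟩ := splitAdj_shape pAdj y rest'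
    by_cases hxy : pAdj x y = true
    · have h1 := segGo_eq rest' y (cur ++ [x]) segs
      rw [hs] at h1
      have hL : splitAdj pAdj (x :: y :: rest') = (x :: y :: g) :: gs := by
        simp only [splitAdj, hs]; simp [hxy]
      rw [hL]
      simp only [segGo, List.getLastD_concat]
      have hc : (!(cur ++ [x]).isEmpty && y.1 == x.1 + 1 && y.2 == x.2 + 1) = true := by
        simp only [pAdj, pAdjF, pAdjS, Bool.and_eq_true] at hxy
        simp [hxy.1, hxy.2]
      rw [hc]
      simp only [if_true]
      simpa using h1
    · have h1 := segGo_eq rest' y [] (segs ++ [cur ++ [x]])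
      rw [hs] at h1
      have hL : splitAdj pAdj (x :: y :: rest') = [x] :: (y :: g) :: gs := by
        simp only [splitAdj, hs]; simp [hxy]
      rw [hL]
      simp only [segGo, List.getLastD_concat]
      have hc : (!(cur ++ [x]).isEmpty && y.1 == x.1 + 1 && y.2 == x.2 + 1) = false := by
        simp only [pAdj, pAdjF, pAdjS, Bool.and_eq_true] at hxy
        rcases Decidable.not_and_iff_not_or_not.mp hxy with h | h <;> simp [h]
      rw [hc]
      simp only [Bool.false_eq_true, if_false]
      rw [if_neg (by simp)]
      simpa using h1

theorem segments_eq_splitAdj : (ps : List (Int × Int)) → segments ps = splitAdj pAdj ps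
  | [] => rfl
  | p :: ps' => by
    obtain ⟨g, gs, hs⟩ := splitAdj_shape pAdj p ps'
    have h1 := segGo_eq ps' p [] []
    rw [hs] at h1
    simp only [segments, segGo, List.isEmpty_nil, Bool.not_true, Bool.false_and, Bool.false_eq_true,
      if_false, if_true]
    rw [hs]
    simpa using h1

theorem mem_of_mem_splitAdj {α : Type} {r : α → α → Bool} {l h : List α} {a : α}
    (hm : h ∈ splitAdj r l) (ha : a ∈ h) : a ∈ l := by
  rw [← splitAdj_flatten r l]
  exact List.mem_flatten.mpr ⟨h, hm, ha⟩

-- an ascending +1 run is exactly range(head, last + 1)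
theorem run_range : (xs : List Int) → (x : Int) →
    List.IsChain (fun a b : Int => b = a + 1) (x :: xs) →
    x ≤ (x :: xs).getLastD 0 ∧ PySem.List.pyRange x ((x :: xs).getLastD 0 + 1) 1 = x :: xs
  | [], x, _ => by
    simp [PySem.List.pyRange_one_singleton]
  | y :: ys, x, hc => by
    obtain ⟨hxy, hc'⟩ := List.isChain_cons_cons.mp hc
    obtain ⟨h1, h2⟩ := run_range ys y hc'
    have hlast : (x :: y :: ys).getLastD 0 = (y :: ys).getLastD 0 := by simp
    subst hxy
    refine ⟨by omega, ?_⟩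
    rw [hlast, PySem.List.pyRange_one_cons (by omega), h2]

theorem find?_eq_some_of_nodup_keys {κ β : Type} [BEq κ] [LawfulBEq κ] :
    (l : List (κ × β)) → (l.map Prod.fst).Nodup → ∀ p ∈ l, l.find? (fun q => q.1 == p.1) = some p
  | [], _, p, hp => by simp at hp
  | r :: l', hnd, p, hp => by
    rcases List.mem_cons.mp hp with h | h
    · subst h; simp [List.find?_cons_of_pos]
    · have hne : r.1 ≠ p.1 := by
        intro he
        have : p.1 ∈ l'.map Prod.fst := List.mem_map.mpr ⟨p, h, rfl⟩
        rw [← he] at this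
        exact (List.nodup_cons.mp hnd).1 this
      rw [List.find?_cons_of_neg (by simpa using hne)]
      exact find?_eq_some_of_nodup_keys l' (List.nodup_cons.mp hnd).2 p h

theorem insert_noop {d : PySem.Dict Int Int} {k v : Int} (hc : d.contains k = true)
    (hval : ∀ q ∈ d.items, q.1 = k → q.2 = v) : d.insert k v = d := by
  apply PySem.Dict.ext
  simp only [PySem.Dict.insert, hc, if_true]
  conv_rhs => rw [← List.map_id d.items]
  apply List.map_congr_left
  intro p hp
  by_cases hpk : p.1 = k
  · have h2 := hval p hp hpk
    obtain ⟨p1, p2⟩ := p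
    simp only at hpk h2
    subst hpk; subst h2
    simp
  · simp [hpk]

theorem find?_self_of_pyLookup {nmap : List (Int × Int)} {b u : Int}
    (hl : pyLookup nmap b = some u) : nmap.find? (fun r => r.1 == b) = some (b, u) := by
  unfold pyLookup at hl
  cases hfind : nmap.find? (fun r => r.1 == b) with
  | none => rw [hfind] at hl; simp at hl
  | some q =>
    rw [hfind] at hl
    have hpred := List.find?_some hfind
    obtain ⟨q1, q2⟩ := q
    simp only [beq_iff_eq] at hpred
    rw [Option.map_some] at hl
    injection hl with hl
    simp only at hpred hl
    subst hpred; subst hl; rfl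

theorem build_eq (nmap : List (Int × Int)) :
    (residues : List Int) → ∀ (d : PySem.Dict Int Int) (seen : PySem.Set Int),
    (∀ b : Int, PySem.Set.contains seen b = d.contains b) →
    (∀ q ∈ d.items, nmap.find? (fun r => r.1 == q.1) = some q) →
    ((d.items.map Prod.fst).Nodup) →
    ((residues.foldl (fun (ref : PySem.Dict Int Int) bound_res =>
        match pyLookup nmap bound_res with
        | some ub => ref.insert bound_res ub
        | none => ref) d).items =
      (residues.foldl (fun (st : PySem.Set Int × List (Int × Int)) b =>
        match pyLookup nmap b with
        | some u => if PySem.Set.contains st.1 b then st else (PySem.Set.add st.1 b, st.2 ++ [(b, u)])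
        | none => st) (seen, d.items)).2 ∧
     (((residues.foldl (fun (ref : PySem.Dict Int Int) bound_res =>
        match pyLookup nmap bound_res with
        | some ub => ref.insert bound_res ub
        | none => ref) d).items.map Prod.fst).Nodup) ∧
     (∀ q ∈ (residues.foldl (fun (ref : PySem.Dict Int Int) bound_res =>
        match pyLookup nmap bound_res with
        | some ub => ref.insert bound_res ub
        | none => ref) d).items,
        nmap.find? (fun r => r.1 == q.1) = some q ∧ (q.1 ∈ residues ∨ q ∈ d.items)))
  | [], d, seen, hcont, hval, hnd => ⟨rfl, hnd, fun q hq => ⟨hval q hq, Or.inr hq⟩⟩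
  | b :: res', d, seen, hcont, hval, hnd => by
    simp only [List.foldl_cons]
    cases hl : pyLookup nmap b with
    | none =>
      simp only []
      obtain ⟨e1, e2, e3⟩ := build_eq nmap res' d seen hcont hval hnd

      exact ⟨e1, e2, fun q hq => ⟨(e3 q hq).1,
        ((e3 q hq).2).imp (List.mem_cons_of_mem _) id⟩⟩
    | some u =>
      simp only []
      have hfind := find?_self_of_pyLookup hl
      by_cases hc : d.contains b = true
      · have hseen : PySem.Set.contains seen b = true := by rw [hcont]; exact hc
        have hnoop : d.insert b u = d := by
          apply insert_noop hc
          intro q hq hqk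
          have h2 := hval q hq
          rw [hqk] at h2
          rw [h2] at hfind
          injection hfind with hfind
          simp [hfind]
        rw [hnoop, hseen]
        simp only [if_true]
        obtain ⟨e1, e2, e3⟩ := build_eq nmap res' d seen hcont hval hnd
        exact ⟨e1, e2, fun q hq => ⟨(e3 q hq).1,
          ((e3 q hq).2).imp (List.mem_cons_of_mem _) id⟩⟩
      · have hseen : PySem.Set.contains seen b = false := by rw [hcont]; simpa using hc
        rw [hseen]
        simp only [Bool.false_eq_true, if_false]
        have hkey_notin : b ∉ d.items.map Prod.fst := by
          intro hmem
          apply hc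
          obtain ⟨q, hq, hq1⟩ := List.mem_map.mp hmem
          exact List.any_eq_true.mpr ⟨q, hq, by simp [hq1]⟩
        have hins : (d.insert b u).items = d.items ++ [(b, u)] := by
          simp only [PySem.Dict.insert, hc]
          simp
        have hd' : (PySem.Dict.mk (d.items ++ [(b, u)])).items = d.items ++ [(b, u)] := rfl
        have hset : ∀ x : Int, PySem.Set.contains (PySem.Set.add seen b) x =
            (PySem.Dict.mk (d.items ++ [(b, u)])).contains x := by
          intro x
          have hbs : b ∉ seen := by
            intro hmem
            have h1 := (PySem.Set.contains_iff seen b).mpr hmem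
            rw [hseen] at h1
            exact Bool.false_ne_true h1
          rw [PySem.Set.add_of_not_mem hbs]
          by_cases hxb : x = b
          · subst hxb
            simp [PySem.Set.contains, PySem.Dict.contains]
          · have hx := hcont x
            simp only [PySem.Set.contains, PySem.Dict.contains] at hx ⊢
            simp only [List.contains_append, List.any_append, hx]
            simp [hxb, Ne.symm hxb]
        have hval' : ∀ q ∈ (PySem.Dict.mk (d.items ++ [(b, u)])).items,
            nmap.find? (fun r => r.1 == q.1) = some q := by
          intro q hq
          rw [hd'] at hq
          rcases List.mem_append.mp hq with h | h
          · exact hval q h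
          · simp only [List.mem_singleton] at h
            subst h
            exact hfind
        have hnd' : ((PySem.Dict.mk (d.items ++ [(b, u)])).items.map Prod.fst).Nodup := by
          rw [hd']
          simp only [List.map_append, List.map_cons, List.map_nil]
          rw [List.nodup_append]
          refine ⟨hnd, List.nodup_singleton _, ?_⟩
          intro a ha b' hb' he
          exact hkey_notin (by rwa [he, List.mem_singleton.mp hb'] at ha)
        have heq : d.insert b u = PySem.Dict.mk (d.items ++ [(b, u)]) := PySem.Dict.ext hins
        rw [heq]
        obtain ⟨e1, e2, e3⟩ := build_eq nmap res' (PySem.Dict.mk (d.items ++ [(b, u)]))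
          (PySem.Set.add seen b) hset hval' hnd'
        rw [hd'] at e1
        refine ⟨e1, e2, fun q hq => ⟨(e3 q hq).1, ?_⟩⟩
        rcases (e3 q hq).2 with h | h
        · exact Or.inl (List.mem_cons_of_mem _ h)
        · rw [hd'] at h
          rcases List.mem_append.mp h with h | h
          · exact Or.inr h
          · simp only [List.mem_singleton] at h
            subst h
            exact Or.inl (List.mem_cons_self)

theorem run_range_fst (g : List (Int × Int)) (hne : g ≠ [])
    (hc : List.IsChain (fun a b => pAdjF a b = true) g) :
    PySem.List.pyRange ((g.map Prod.fst).headD 0) ((g.map Prod.fst).getLastD 0 + 1) 1 = g.map Prod.fst := by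
  obtain ⟨x, t, rfl⟩ := List.exists_cons_of_ne_nil hne
  have hc' : List.IsChain (fun a b : Int => b = a + 1) ((x :: t).map Prod.fst) :=
    (List.isChain_map Prod.fst).mpr (hc.imp (by intro a b h; simpa [pAdjF] using h))
  simp only [List.map_cons] at hc' ⊢
  exact (run_range (t.map Prod.fst) x.1 hc').2

theorem run_range_snd (g : List (Int × Int)) (hne : g ≠ [])
    (hc : List.IsChain (fun a b => pAdjS a b = true) g) :
    PySem.List.pyRange ((g.map Prod.snd).headD 0) ((g.map Prod.snd).getLastD 0 + 1) 1 = g.map Prod.snd := by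
  obtain ⟨x, t, rfl⟩ := List.exists_cons_of_ne_nil hne
  have hc' : List.IsChain (fun a b : Int => b = a + 1) ((x :: t).map Prod.snd) :=
    (List.isChain_map Prod.snd).mpr (hc.imp (by intro a b h; simpa [pAdjS] using h))
  simp only [List.map_cons] at hc' ⊢
  exact (run_range (t.map Prod.snd) x.2 hc').2

theorem getD_get?_of_mem (ps : List (Int × Int)) (hk : (ps.map Prod.fst).Nodup)
    {p : Int × Int} (hp : p ∈ ps) : ((PySem.Dict.mk ps).get? p.1).getD 0 = p.2 := by
  simp only [PySem.Dict.get?]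
  rw [show List.find? (fun q => q.1 == p.1) (PySem.Dict.mk ps).items = some p from
    find?_eq_some_of_nodup_keys ps hk p hp]
  rfl

-- the per-chain core: A's nested re-ranging equals one both-coordinates split
theorem headD_map_snd (h : List (Int × Int)) (hne : h ≠ []) :
    (h.map Prod.snd).headD 0 = (h.headD (0, 0)).2 := by
  cases h <;> simp_all

theorem getLastD_map_snd (h : List (Int × Int)) (hne : h ≠ []) :
    (h.map Prod.snd).getLastD 0 = (h.getLastD (0, 0)).2 := by
  induction h with
  | nil => simp at hne
  | cons a t ih => cases t <;> simp_all

-- the first-occurrence dictionary: lookup = first match over the pair list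
theorem firstKey_fold : (ps : List (Int × Int)) → ∀ (d : PySem.Dict Int Int) (u : Int),
    (ps.foldl (fun (d : PySem.Dict Int Int) p =>
        if d.contains p.2 then d else d.insert p.2 p.1) d).get? u =
      if d.contains u = true then d.get? u else (ps.find? (fun p => p.2 == u)).map Prod.fst
  | [], d, u => by
    by_cases hc : d.contains u = true
    · simp [hc]
    · simp only [List.foldl_nil, List.find?_nil, Option.map_none, hc, if_false]
      exact PySem.Dict.get?_eq_none_iff_contains d u |>.mpr (by simpa using hc)
  | p :: ps', d, u => by
    simp only [List.foldl_cons]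
    by_cases hdc : d.contains p.2 = true
    · rw [if_pos hdc]
      rw [firstKey_fold ps' d u]
      by_cases hup : p.2 = u
      · subst hup
        simp [hdc]
      · rw [List.find?_cons_of_neg (by simpa using hup)]
    · rw [if_neg hdc]
      rw [firstKey_fold ps' (d.insert p.2 p.1) u]
      by_cases hup : p.2 = u
      · subst hup
        rw [List.find?_cons_of_pos (by simp)]
        have hci : (d.insert p.2 p.1).contains p.2 = true := by
          simp [PySem.Dict.contains_insert]
        rw [if_pos hci, PySem.Dict.get?_insert_self]
        have hcu : d.contains p.2 = true → False := by simp [hdc]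
        simp [hdc]
      · have hci : (d.insert p.2 p.1).contains u = d.contains u := by
          rw [PySem.Dict.contains_insert]
          simp [Ne.symm hup]
        rw [hci, List.find?_cons_of_neg (by simpa using hup)]
        by_cases hcu : d.contains u = true
        · rw [if_pos hcu, if_pos hcu, PySem.Dict.get?_insert_of_ne]
          simpa using (Ne.symm hup)
        · simp [hcu]

theorem fst_find?_eq_getD_index : (ps : List (Int × Int)) → (u : Int) → u ∈ ps.map Prod.snd →
    ((ps.find? (fun p => p.2 == u)).map Prod.fst).getD 0
      = (ps.map Prod.fst).getD ((PySem.List.index? (ps.map Prod.snd) u).getD 0) 0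
  | [], u, hu => by simp at hu
  | p :: ps', u, hu => by
    by_cases hup : p.2 = u
    · subst hup
      rw [List.find?_cons_of_pos (by simp)]
      simp only [List.map_cons]
      rw [PySem.List.index?_cons_self]
      simp
    · have hu' : u ∈ ps'.map Prod.snd := by
        rcases List.mem_map.mp hu with ⟨q, hq, hq2⟩
        rcases List.mem_cons.mp hq with h | h
        · exact absurd (h ▸ hq2) hup
        · exact List.mem_map.mpr ⟨q, h, hq2⟩
      obtain ⟨i, hi⟩ := Option.isSome_iff_exists.mp
        ((PySem.List.index?_isSome_iff (ps'.map Prod.snd) u).mpr hu')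
      have IH := fst_find?_eq_getD_index ps' u hu'
      rw [List.find?_cons_of_neg (by simpa using hup)]
      simp only [List.map_cons]
      rw [PySem.List.index?_cons_of_ne _ hup, hi]
      rw [hi] at IH
      simpa using IH

-- the head of get_range is (head, end of the first +1 run)
theorem get_range_headD : (xs : List Int) → (x : Int) →
    (get_range (x :: xs)).headD (0, 0) = (x, firstRunEnd x xs)
  | [], x => by simp [get_range, groupRuns, firstRunEnd]
  | y :: ys, x => by
    have IH := get_range_headD ys y
    rw [get_range, groupRuns_eq_splitAdj] at IH ⊢
    obtain ⟨g, gs, hs⟩ := splitAdj_shape (fun a b : Int => b == a + 1) y ys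
    rw [hs] at IH
    by_cases hxy : y = x + 1
    · subst hxy
      have hL : splitAdj (fun a b : Int => b == a + 1) (x :: (x + 1) :: ys) = (x :: (x + 1) :: g) :: gs := by
        simp only [splitAdj, hs]; simp
      rw [hL]
      simp only [List.map_cons, List.headD_cons] at IH ⊢
      have hfr : firstRunEnd x ((x + 1) :: ys) = firstRunEnd (x + 1) ys := by simp [firstRunEnd]
      rw [hfr]
      have hg2 : (x :: (x + 1) :: g).getLastD 0 = ((x + 1) :: g).getLastD 0 := by simp
      rw [hg2]
      rw [show ((x + 1) :: g).getLastD 0 = firstRunEnd (x + 1) ys from by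
        simpa using congrArg Prod.snd IH]
    · have hL : splitAdj (fun a b : Int => b == a + 1) (x :: y :: ys) = [x] :: (y :: g) :: gs := by
        simp only [splitAdj, hs]; simp [hxy]
      rw [hL]
      simp [firstRunEnd, hxy]

-- the per-chain core: A's nested re-ranging equals one both-coordinates split with
-- first-occurrence bound lookups
theorem chainA_eq (chain : String) (ps : List (Int × Int))
    (hk : (ps.map Prod.fst).Nodup) :
    (get_range (ps.map Prod.fst)).flatMap (fun br =>
      (get_range ((PySem.List.pyRange br.1 (br.2 + 1) 1).map
          (fun b => ((PySem.Dict.mk ps).get? b).getD 0))).map (fun ur =>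
        mkZone chain
          ((get_range ((PySem.List.pyRange ur.1 (ur.2 + 1) 1).map
              (fun u => (ps.map Prod.fst).getD ((PySem.List.index? (ps.map Prod.snd) u).getD 0) 0))).headD (0, 0)).1
          ((get_range ((PySem.List.pyRange ur.1 (ur.2 + 1) 1).map
              (fun u => (ps.map Prod.fst).getD ((PySem.List.index? (ps.map Prod.snd) u).getD 0) 0))).headD (0, 0)).2
          ur.1 ur.2)) =
    (splitAdj pAdj ps).map (fun seg =>
      mkZone chain
        ((((PySem.List.pyRange (seg.headD (0, 0)).2 ((seg.getLastD (0, 0)).2 + 1) 1).map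
            (fun u => ((ps.foldl (fun (d : PySem.Dict Int Int) p =>
                if d.contains p.2 then d else d.insert p.2 p.1) (PySem.Dict.mk [])).get? u).getD 0))).headD 0)
        (firstRunEnd
          ((((PySem.List.pyRange (seg.headD (0, 0)).2 ((seg.getLastD (0, 0)).2 + 1) 1).map
            (fun u => ((ps.foldl (fun (d : PySem.Dict Int Int) p =>
                if d.contains p.2 then d else d.insert p.2 p.1) (PySem.Dict.mk [])).get? u).getD 0))).headD 0)
          (((PySem.List.pyRange (seg.headD (0, 0)).2 ((seg.getLastD (0, 0)).2 + 1) 1).map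
            (fun u => ((ps.foldl (fun (d : PySem.Dict Int Int) p =>
                if d.contains p.2 then d else d.insert p.2 p.1) (PySem.Dict.mk [])).get? u).getD 0)).tail))
        (seg.headD (0, 0)).2 (seg.getLastD (0, 0)).2) := by
  have h1 : get_range (ps.map Prod.fst)
      = (splitAdj pAdjF ps).map (fun g => ((g.map Prod.fst).headD 0, (g.map Prod.fst).getLastD 0)) := by
    rw [get_range, groupRuns_eq_splitAdj, splitAdj_map, List.map_map]; rfl
  rw [h1, List.flatMap_map]
  rw [show splitAdj pAdj ps = (splitAdj pAdjF ps).flatMap (splitAdj pAdjS) from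
    (splitAdj_nested pAdjF pAdjS ps).symm]
  rw [List.map_flatMap]
  apply List.flatMap_congr
  intro g hg
  obtain ⟨hgne, hgchain⟩ := isChain_of_mem_splitAdj pAdjF ps g hg
  rw [run_range_fst g hgne hgchain]
  have h2 : (g.map Prod.fst).map (fun b => ((PySem.Dict.mk ps).get? b).getD 0) = g.map Prod.snd := by
    rw [List.map_map]
    apply List.map_congr_left
    intro p hp
    exact getD_get?_of_mem ps hk (mem_of_mem_splitAdj hg hp)
  rw [h2]
  have h3 : get_range (g.map Prod.snd)
      = (splitAdj pAdjS g).map (fun h => ((h.map Prod.snd).headD 0, (h.map Prod.snd).getLastD 0)) := by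
    rw [get_range, groupRuns_eq_splitAdj, splitAdj_map, List.map_map]; rfl
  rw [h3, List.map_map]
  apply List.map_congr_left
  intro h hh
  obtain ⟨hhne, hhchainS⟩ := isChain_of_mem_splitAdj pAdjS g h hh
  simp only [Function.comp_apply]
  rw [headD_map_snd h hhne, getLastD_map_snd h hhne]
  -- the common u-range
  have hrange : PySem.List.pyRange (h.headD (0, 0)).2 ((h.getLastD (0, 0)).2 + 1) 1 = h.map Prod.snd := by
    rw [← headD_map_snd h hhne, ← getLastD_map_snd h hhne]
    exact run_range_snd h hhne hhchainS
  rw [hrange]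
  -- the two per-u lookups agree: first-occurrence dict = list(values).index
  have hbl : (h.map Prod.snd).map
      (fun u => ((ps.foldl (fun (d : PySem.Dict Int Int) p =>
          if d.contains p.2 then d else d.insert p.2 p.1) (PySem.Dict.mk [])).get? u).getD 0)
      = (h.map Prod.snd).map
      (fun u => (ps.map Prod.fst).getD ((PySem.List.index? (ps.map Prod.snd) u).getD 0) 0) := by
    apply List.map_congr_left
    intro u hu
    obtain ⟨p, hp, hpu⟩ := List.mem_map.mp hu
    have hups : u ∈ ps.map Prod.snd :=
      List.mem_map.mpr ⟨p, mem_of_mem_splitAdj hg (mem_of_mem_splitAdj hh hp), hpu⟩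
    rw [firstKey_fold ps (PySem.Dict.mk []) u]
    rw [if_neg (by simp [PySem.Dict.contains])]
    exact fst_find?_eq_getD_index ps u hups
  rw [hbl]
  -- both sides now hold the same nonempty list bl; its get_range head is (head, first-run end)
  obtain ⟨a, t, rfl⟩ := List.exists_cons_of_ne_nil hhne
  simp only [List.map_cons, List.headD_cons, List.tail_cons]
  rw [get_range_headD]


-- A's and B's per-chain bodies, as flatMap/map forms of the ports' folds
def AOut (c_dic : List (String × List (String × List Int))) (numbering_dic : List (String × List (Int × Int))) (chain : String) : List String :=
  let cmap := (pyLookup c_dic chain).getD []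
  let bound_list := (cmap.headD ("", [])).2
  let nmap := (pyLookup numbering_dic chain).getD []
  let ref := bound_list.foldl (fun (ref : PySem.Dict Int Int) bound_res =>
      match pyLookup nmap bound_res with
      | some ub => ref.insert bound_res ub
      | none => ref) (PySem.Dict.mk [])
  (get_range ref.keys).flatMap (fun bound_range =>
    (get_range ((PySem.List.pyRange bound_range.1 (bound_range.2 + 1) 1).map
        (fun bound_res => (ref.get? bound_res).getD 0))).map (fun unbound_range =>
      mkZone chain
        ((get_range ((PySem.List.pyRange unbound_range.1 (unbound_range.2 + 1) 1).map
            (fun u => ref.keys.getD ((PySem.List.index? ref.values u).getD 0) 0))).headD (0, 0)).1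
        ((get_range ((PySem.List.pyRange unbound_range.1 (unbound_range.2 + 1) 1).map
            (fun u => ref.keys.getD ((PySem.List.index? ref.values u).getD 0) 0))).headD (0, 0)).2
        unbound_range.1 unbound_range.2))

def BOut (numbering_dic : List (String × List (Int × Int))) (pr : String × List (String × List Int)) : List String :=
  let chain := pr.1
  let residues := (pr.2.headD ("", [])).2
  let nmap := (pyLookup numbering_dic chain).getD []
  let pairs := (residues.foldl (fun (st : PySem.Set Int × List (Int × Int)) b =>
      match pyLookup nmap b with
      | some u => if PySem.Set.contains st.1 b then st else (PySem.Set.add st.1 b, st.2 ++ [(b, u)])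
      | none => st) (PySem.Set.empty, [])).2
  let first_key := pairs.foldl (fun (d : PySem.Dict Int Int) p =>
      if d.contains p.2 then d else d.insert p.2 p.1) (PySem.Dict.mk [])
  (segments pairs).map (fun seg =>
    mkZone chain
      (((PySem.List.pyRange (seg.headD (0, 0)).2 ((seg.getLastD (0, 0)).2 + 1) 1).map
          (fun u => (first_key.get? u).getD 0)).headD 0)
      (firstRunEnd
        (((PySem.List.pyRange (seg.headD (0, 0)).2 ((seg.getLastD (0, 0)).2 + 1) 1).map
          (fun u => (first_key.get? u).getD 0)).headD 0)
        ((PySem.List.pyRange (seg.headD (0, 0)).2 ((seg.getLastD (0, 0)).2 + 1) 1).map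
          (fun u => (first_key.get? u).getD 0)).tail)
      (seg.headD (0, 0)).2 (seg.getLastD (0, 0)).2)

theorem retrieve_izone_eq_flatMap (c_dic : List (String × List (String × List Int))) (numbering_dic : List (String × List (Int × Int))) :
    retrieve_izone c_dic numbering_dic = (c_dic.map (fun p => p.1)).flatMap (fun chain => AOut c_dic numbering_dic chain) := by
  simp only [retrieve_izone, AOut, PySem.List.foldl_append_singleton_eq_map,
    PySem.List.foldl_append_eq_flatMap, List.nil_append]

theorem retrieve_izone_alt_eq_flatMap (c_dic : List (String × List (String × List Int))) (numbering_dic : List (String × List (Int × Int))) :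
    retrieve_izone_alt c_dic numbering_dic = c_dic.flatMap (fun pr => BOut numbering_dic pr) := by
  simp only [retrieve_izone_alt, BOut, PySem.List.foldl_append_singleton_eq_map,
    PySem.List.foldl_append_eq_flatMap, List.nil_append]

theorem chain_core (chain : String) (residues : List Int) (nmap : List (Int × Int)) :
    (let ref := residues.foldl (fun (ref : PySem.Dict Int Int) bound_res =>
        match pyLookup nmap bound_res with
        | some ub => ref.insert bound_res ub
        | none => ref) (PySem.Dict.mk [])
     (get_range ref.keys).flatMap (fun bound_range =>
      (get_range ((PySem.List.pyRange bound_range.1 (bound_range.2 + 1) 1).map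
          (fun bound_res => (ref.get? bound_res).getD 0))).map (fun unbound_range =>
        mkZone chain
          ((get_range ((PySem.List.pyRange unbound_range.1 (unbound_range.2 + 1) 1).map
              (fun u => ref.keys.getD ((PySem.List.index? ref.values u).getD 0) 0))).headD (0, 0)).1
          ((get_range ((PySem.List.pyRange unbound_range.1 (unbound_range.2 + 1) 1).map
              (fun u => ref.keys.getD ((PySem.List.index? ref.values u).getD 0) 0))).headD (0, 0)).2
          unbound_range.1 unbound_range.2))) =
    (let pairs := (residues.foldl (fun (st : PySem.Set Int × List (Int × Int)) b =>
        match pyLookup nmap b with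
        | some u => if PySem.Set.contains st.1 b then st else (PySem.Set.add st.1 b, st.2 ++ [(b, u)])
        | none => st) (PySem.Set.empty, [])).2
     let first_key := pairs.foldl (fun (d : PySem.Dict Int Int) p =>
        if d.contains p.2 then d else d.insert p.2 p.1) (PySem.Dict.mk [])
     (segments pairs).map (fun seg =>
      mkZone chain
        (((PySem.List.pyRange (seg.headD (0, 0)).2 ((seg.getLastD (0, 0)).2 + 1) 1).map
            (fun u => (first_key.get? u).getD 0)).headD 0)
        (firstRunEnd
          (((PySem.List.pyRange (seg.headD (0, 0)).2 ((seg.getLastD (0, 0)).2 + 1) 1).map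
            (fun u => (first_key.get? u).getD 0)).headD 0)
          ((PySem.List.pyRange (seg.headD (0, 0)).2 ((seg.getLastD (0, 0)).2 + 1) 1).map
            (fun u => (first_key.get? u).getD 0)).tail)
        (seg.headD (0, 0)).2 (seg.getLastD (0, 0)).2)) := by
  obtain ⟨e1, e2, e3⟩ := build_eq nmap residues (PySem.Dict.mk []) PySem.Set.empty
    (fun b => rfl) (by intro q hq; cases hq) (by simp)
  dsimp only
  rw [show (residues.foldl (fun (ref : PySem.Dict Int Int) bound_res =>
        match pyLookup nmap bound_res with
        | some ub => ref.insert bound_res ub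
        | none => ref) (PySem.Dict.mk []))
      = PySem.Dict.mk ((residues.foldl (fun (st : PySem.Set Int × List (Int × Int)) b =>
        match pyLookup nmap b with
        | some u => if PySem.Set.contains st.1 b then st else (PySem.Set.add st.1 b, st.2 ++ [(b, u)])
        | none => st) (PySem.Set.empty, [])).2) from PySem.Dict.ext e1]
  rw [e1] at e2
  rw [segments_eq_splitAdj]
  exact chainA_eq chain _ e2

theorem chain_eq (c_dic : List (String × List (String × List Int))) (numbering_dic : List (String × List (Int × Int)))
    (hpre : Pre_retrieve_izone c_dic numbering_dic) :
    ∀ pr ∈ c_dic, AOut c_dic numbering_dic pr.1 = BOut numbering_dic pr := by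
  intro pr hpr
  obtain ⟨hck, _, _, _⟩ := hpre
  have hcmap : pyLookup c_dic pr.1 = some pr.2 := by
    unfold pyLookup
    rw [find?_eq_some_of_nodup_keys c_dic hck pr hpr]
    rfl
  unfold AOut BOut
  rw [hcmap]
  exact chain_core pr.1 ((pr.2.headD ("", [])).2) ((pyLookup numbering_dic pr.1).getD [])

theorem retrieve_izone_spec : Claim_equal_retrieve_izone := by
  intro c_dic numbering_dic _ hpre
  unfold Spec_retrieve_izone
  rw [retrieve_izone_eq_flatMap, retrieve_izone_alt_eq_flatMap, List.flatMap_map]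
  exact List.flatMap_congr (fun pr hpr => chain_eq c_dic numbering_dic hpre pr hpr)
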